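-- pv_equiv track=rewrite | github.com/wavenumber-eng/altium_monkey | src/py/altium_monkey/altium_record_sch__text_frame.py | _decode_altium_multiline_text
-- ===== SOURCE A (Python) =====
-- def _decode_altium_multiline_text(value: str) -> str:
--     """
--     Decode Altium text-frame multiline escapes to normal Python text.
--
--     Native V5 stores text-frame and note content with:
--     - ``~1`` for newline
--     - ``~2`` for ``|``
--     - ``~~`` for a literal ``~``
--     """
--     normalized = value.replace("\r\n", "\n").replace("\r", "\n")
--     result: list[str] = []
--     i = 0
--     while i < len(normalized):
--         char = normalized[i]
--         if char == "~" and i + 1 < len(normalized):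
--             next_char = normalized[i + 1]
--             if next_char == "1":
--                 result.append("\n")
--                 i += 2
--                 continue
--             if next_char == "2":
--                 result.append("|")
--                 i += 2
--                 continue
--             if next_char == "~":
--                 result.append("~")
--                 i += 2
--                 continue
--         result.append(char)
--         i += 1
--     return "".join(result)
-- ===== SOURCE B (Python) =====
-- def _decode_altium_multiline_text(value: str) -> str:
--     """Decode Altium text-frame escapes (~1 newline, ~2 '|', ~~ '~') via split/replace/join."""
--     normalized = value.replace("\r\n", "\n").replace("\r", "\n")
--     return "~".join(
--         part.replace("~1", "\n").replace("~2", "|")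
--         for part in normalized.split("~~")
--     )
-- ===== Notes on version B (the rewrite author's own statement) =====
-- stated objective: idiomatic
-- what changed: Replaced the manual index-scanning while loop (one-character lookahead, i advanced by 1 or 2) with a split on the doubled-tilde escape, a per-part replace of the newline and pipe escapes, and a tilde join, delegating escape precedence to the string builtins.
import Mathlib
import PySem

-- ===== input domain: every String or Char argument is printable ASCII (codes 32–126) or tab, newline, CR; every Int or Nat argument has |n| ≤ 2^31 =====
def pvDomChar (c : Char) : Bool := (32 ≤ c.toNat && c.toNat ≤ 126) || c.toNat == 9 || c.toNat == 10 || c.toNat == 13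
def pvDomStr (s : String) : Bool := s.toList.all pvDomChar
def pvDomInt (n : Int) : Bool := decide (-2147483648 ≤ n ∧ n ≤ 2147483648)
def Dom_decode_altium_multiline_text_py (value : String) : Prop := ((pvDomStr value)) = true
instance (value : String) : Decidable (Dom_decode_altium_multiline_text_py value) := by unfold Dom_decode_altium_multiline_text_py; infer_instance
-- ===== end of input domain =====

-- B replaces A's index-scanning while loop by the split / per-part replace / join pipeline (idiomatic; measured faster by a constant factor: C-level builtins instead of a per-character Python loop).

-- ===== PORT A =====
-- A's while loop over index i with one-character lookahead, as the obvious structural recursion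
-- over the remaining characters ('i += 2' = drop two, 'i += 1' = drop one; result list + join = building the output list).
def pvAScan : List Char → List Char
  | [] => []
  | '~' :: next :: rest =>
      if next = '1' then '\n' :: pvAScan rest
      else if next = '2' then '|' :: pvAScan rest
      else if next = '~' then '~' :: pvAScan rest
      else '~' :: pvAScan (next :: rest)
  | c :: rest => c :: pvAScan rest

def decode_altium_multiline_text_py (value : String) : String :=
  let normalized := PySem.Str.replace (PySem.Str.replace value "\r\n" "\n") "\r" "\n"
  String.ofList (pvAScan normalized.toList)

-- ===== PORT B =====
-- part.replace("~1", "\n").replace("~2", "|")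
def pvDecodePart (p : List Char) : List Char :=
  PySem.Chars.replace (PySem.Chars.replace p "~1".toList "\n".toList) "~2".toList "|".toList

def decode_altium_multiline_text_py_alt (value : String) : String :=
  let normalized := PySem.Str.replace (PySem.Str.replace value "\r\n" "\n") "\r" "\n"
  String.ofList (PySem.Chars.join "~".toList
    ((PySem.Chars.splitOn normalized.toList "~~".toList).map pvDecodePart))

-- ===== PRECONDITION & SPEC =====
def Spec_decode_altium_multiline_text_py (value : String) (out : String) : Prop := out = decode_altium_multiline_text_py_alt value
instance (value : String) (out : String) : Decidable (Spec_decode_altium_multiline_text_py value out) := by unfold Spec_decode_altium_multiline_text_py; infer_instance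

-- ===== CLAIM (what is proved, stated in full; the proofs are below) =====
def Claim_equal_decode_altium_multiline_text_py : Prop := ∀ (value : String), Dom_decode_altium_multiline_text_py value → Spec_decode_altium_multiline_text_py value (decode_altium_multiline_text_py value)

-- ===== LEMMAS AND PROOFS =====

-- replace("~1", "\n") as a direct recursion
def pvRep1 : List Char → List Char
  | '~' :: '1' :: t => '\n' :: pvRep1 t
  | c :: t => c :: pvRep1 t
  | [] => []

-- replace("~2", "|") as a direct recursion
def pvRep2 : List Char → List Char
  | '~' :: '2' :: t => '|' :: pvRep2 t
  | c :: t => c :: pvRep2 t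
  | [] => []

-- split("~~") as a direct recursion
def pvSpl : List Char → List (List Char)
  | '~' :: '~' :: t => [] :: pvSpl t
  | c :: t => (c :: (pvSpl t).headI) :: (pvSpl t).tail
  | [] => [[]]

lemma pvSpl_ne_nil (l : List Char) : pvSpl l ≠ [] := by
  induction l using pvSpl.induct <;> simp [pvSpl]

lemma pvRep1_cons_of_not_prefix (c : Char) (t : List Char)
    (h : ¬ (['~','1'].isPrefixOf (c :: t) = true)) : pvRep1 (c :: t) = c :: pvRep1 t := by
  rw [pvRep1.eq_def]
  split
  · rename_i t' heq
    injection heq with h1 h2; subst h1; subst h2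
    simp [List.isPrefixOf] at h
  · rename_i c' t' _ heq
    injection heq with h1 h2; subst h1; subst h2; rfl
  · rename_i heq; exact absurd heq (by simp)

lemma pvRep2_cons_of_not_prefix (c : Char) (t : List Char)
    (h : ¬ (['~','2'].isPrefixOf (c :: t) = true)) : pvRep2 (c :: t) = c :: pvRep2 t := by
  rw [pvRep2.eq_def]
  split
  · rename_i t' heq
    injection heq with h1 h2; subst h1; subst h2
    simp [List.isPrefixOf] at h
  · rename_i c' t' _ heq
    injection heq with h1 h2; subst h1; subst h2; rfl
  · rename_i heq; exact absurd heq (by simp)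

lemma pvSpl_cons_of_not_prefix (c : Char) (t : List Char)
    (h : ¬ (['~','~'].isPrefixOf (c :: t) = true)) :
    pvSpl (c :: t) = (c :: (pvSpl t).headI) :: (pvSpl t).tail := by
  rw [pvSpl.eq_def]
  split
  · rename_i t' heq
    injection heq with h1 h2; subst h1; subst h2
    simp [List.isPrefixOf] at h
  · rename_i c' t' _ heq
    injection heq with h1 h2; subst h1; subst h2; rfl
  · rename_i heq; exact absurd heq (by simp)

lemma pvGo1 (fuel : Nat) : ∀ (l acc : List Char), l.length ≤ fuel →
    PySem.Chars.replace.go ['~','1'] ['\n'] fuel l acc = acc.reverse ++ pvRep1 l := by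
  induction fuel with
  | zero =>
    intro l acc h
    have hl : l = [] := by cases l <;> simp at h ⊢
    subst hl
    simp [PySem.Chars.replace.go, pvRep1]
  | succ n ih =>
    intro l acc h
    cases l with
    | nil => simp [PySem.Chars.replace.go, pvRep1]
    | cons c t =>
      rw [PySem.Chars.replace.go]
      by_cases hp : ['~','1'].isPrefixOf (c :: t) = true
      · cases t with
        | nil => simp [List.isPrefixOf] at hp
        | cons d t' =>
          simp [List.isPrefixOf] at hp
          obtain ⟨rfl, rfl⟩ := hp
          have hc : ['~','1'].isPrefixOf ('~' :: '1' :: t') = true := by simp [List.isPrefixOf]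
          rw [if_pos hc]
          rw [ih (List.drop ['~','1'].length ('~' :: '1' :: t')) (['\n'].reverse ++ acc)
              (by simp at h ⊢; omega)]
          simp [pvRep1]
      · rw [if_neg hp]
        rw [ih t (c :: acc) (by simp at h ⊢; omega)]
        rw [pvRep1_cons_of_not_prefix c t hp]
        simp

lemma pvGo2 (fuel : Nat) : ∀ (l acc : List Char), l.length ≤ fuel →
    PySem.Chars.replace.go ['~','2'] ['|'] fuel l acc = acc.reverse ++ pvRep2 l := by
  induction fuel with
  | zero =>
    intro l acc h
    have hl : l = [] := by cases l <;> simp at h ⊢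
    subst hl
    simp [PySem.Chars.replace.go, pvRep2]
  | succ n ih =>
    intro l acc h
    cases l with
    | nil => simp [PySem.Chars.replace.go, pvRep2]
    | cons c t =>
      rw [PySem.Chars.replace.go]
      by_cases hp : ['~','2'].isPrefixOf (c :: t) = true
      · cases t with
        | nil => simp [List.isPrefixOf] at hp
        | cons d t' =>
          simp [List.isPrefixOf] at hp
          obtain ⟨rfl, rfl⟩ := hp
          have hc : ['~','2'].isPrefixOf ('~' :: '2' :: t') = true := by simp [List.isPrefixOf]
          rw [if_pos hc]
          rw [ih (List.drop ['~','2'].length ('~' :: '2' :: t')) (['|'].reverse ++ acc)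
              (by simp at h ⊢; omega)]
          simp [pvRep2]
      · rw [if_neg hp]
        rw [ih t (c :: acc) (by simp at h ⊢; omega)]
        rw [pvRep2_cons_of_not_prefix c t hp]
        simp

lemma pvGoSpl (fuel : Nat) : ∀ (l cur : List Char) (acc : List (List Char)), l.length < fuel →
    PySem.Chars.splitOn.go ['~','~'] fuel l cur acc
      = acc.reverse ++ (cur.reverse ++ (pvSpl l).headI) :: (pvSpl l).tail := by
  induction fuel with
  | zero => intro l cur acc h; omega
  | succ n ih =>
    intro l cur acc h
    cases l with
    | nil => simp [PySem.Chars.splitOn.go, pvSpl]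
    | cons c t =>
      rw [PySem.Chars.splitOn.go]
      by_cases hp : ['~','~'].isPrefixOf (c :: t) = true
      · cases t with
        | nil => simp [List.isPrefixOf] at hp
        | cons d t' =>
          simp [List.isPrefixOf] at hp
          obtain ⟨rfl, rfl⟩ := hp
          have hc : ['~','~'].isPrefixOf ('~' :: '~' :: t') = true := by simp [List.isPrefixOf]
          rw [if_pos hc]
          rw [ih (List.drop ['~','~'].length ('~' :: '~' :: t')) [] (cur.reverse :: acc)
              (by simp at h ⊢; omega)]
          obtain ⟨h0, ps, hps⟩ : ∃ h0 ps, pvSpl t' = h0 :: ps := by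
            rcases hsp : pvSpl t' with _ | ⟨h0, ps⟩
            · exact absurd hsp (pvSpl_ne_nil t')
            · exact ⟨h0, ps, rfl⟩
          simp [pvSpl, hps]
      · rw [if_neg hp]
        rw [ih t (c :: cur) acc (by simp at h ⊢; omega)]
        rw [pvSpl_cons_of_not_prefix c t hp]
        simp

lemma pvReplace1_eq (l : List Char) : PySem.Chars.replace l ['~','1'] ['\n'] = pvRep1 l := by
  rw [PySem.Chars.replace]
  rw [if_neg (by simp)]
  rw [pvGo1 l.length l [] le_rfl]
  simp

lemma pvReplace2_eq (l : List Char) : PySem.Chars.replace l ['~','2'] ['|'] = pvRep2 l := by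
  rw [PySem.Chars.replace]
  rw [if_neg (by simp)]
  rw [pvGo2 l.length l [] le_rfl]
  simp

lemma pvSplitOn_eq (l : List Char) : PySem.Chars.splitOn l ['~','~'] = pvSpl l := by
  rw [PySem.Chars.splitOn]
  rw [pvGoSpl (l.length + 1) l [] [] (Nat.lt_succ_self _)]
  obtain ⟨h0, ps, hps⟩ : ∃ h0 ps, pvSpl l = h0 :: ps := by
    rcases hsp : pvSpl l with _ | ⟨h0, ps⟩
    · exact absurd hsp (pvSpl_ne_nil l)
    · exact ⟨h0, ps, rfl⟩
  simp [hps]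

lemma pvJoin_cons (x : List Char) (xs : List (List Char)) :
    PySem.Chars.join ['~'] (x :: xs) = x ++ xs.flatMap (fun y => '~' :: y) := by
  rw [PySem.Chars.join]
  induction xs generalizing x with
  | nil => simp [List.intercalate]
  | cons y ys ih =>
    rw [show List.intercalate ['~'] (x :: y :: ys) = x ++ ['~'] ++ List.intercalate ['~'] (y :: ys) by
      simp [List.intercalate, List.intersperse]]
    rw [ih y]
    simp

-- head-step facts used by the main induction
lemma pvRep1_cons_ne (c : Char) (t : List Char) (hc : c ≠ '~') :
    pvRep1 (c :: t) = c :: pvRep1 t := by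
  apply pvRep1_cons_of_not_prefix
  simp [List.isPrefixOf]
  intro h; exact absurd h.symm hc

lemma pvRep2_cons_ne (c : Char) (t : List Char) (hc : c ≠ '~') :
    pvRep2 (c :: t) = c :: pvRep2 t := by
  apply pvRep2_cons_of_not_prefix
  simp [List.isPrefixOf]
  intro h; exact absurd h.symm hc

lemma pvRep1_tilde (d : Char) (t : List Char) (hd : d ≠ '1') :
    pvRep1 ('~' :: d :: t) = '~' :: pvRep1 (d :: t) := by
  apply pvRep1_cons_of_not_prefix
  simp [List.isPrefixOf]
  intro h; exact absurd h.symm hd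

lemma pvRep2_tilde (d : Char) (t : List Char) (hd : d ≠ '2') :
    pvRep2 ('~' :: d :: t) = '~' :: pvRep2 (d :: t) := by
  apply pvRep2_cons_of_not_prefix
  simp [List.isPrefixOf]
  intro h; exact absurd h.symm hd

lemma pvSpl_cons_ne (c : Char) (t : List Char) (hc : c ≠ '~') :
    pvSpl (c :: t) = (c :: (pvSpl t).headI) :: (pvSpl t).tail := by
  apply pvSpl_cons_of_not_prefix
  simp [List.isPrefixOf]
  intro h; exact absurd h.symm hc

lemma pvSpl_tilde (d : Char) (t : List Char) (hd : d ≠ '~') :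
    pvSpl ('~' :: d :: t) = ('~' :: (pvSpl (d :: t)).headI) :: (pvSpl (d :: t)).tail := by
  apply pvSpl_cons_of_not_prefix
  simp [List.isPrefixOf]
  intro h; exact absurd h.symm hd

lemma pvDec_cons_ne (c : Char) (t : List Char) (hc : c ≠ '~') :
    pvRep2 (pvRep1 (c :: t)) = c :: pvRep2 (pvRep1 t) := by
  rw [pvRep1_cons_ne c t hc, pvRep2_cons_ne c _ hc]

lemma pvAScan_cons_ne (c : Char) (t : List Char) (hc : c ≠ '~') :
    pvAScan (c :: t) = c :: pvAScan t := by
  rw [pvAScan.eq_def]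
  split
  · rename_i heq; exact absurd heq (by simp)
  · rename_i next rest heq
    injection heq with e1 e2
    exact absurd e1 hc
  · rename_i c' rest _ heq
    injection heq with e1 e2; subst e1; subst e2; rfl

lemma pvSpl_dest (l : List Char) : ∃ h0 ps, pvSpl l = h0 :: ps := by
  rcases hsp : pvSpl l with _ | ⟨h0, ps⟩
  · exact absurd hsp (pvSpl_ne_nil l)
  · exact ⟨h0, ps, rfl⟩

lemma pvMain (l : List Char) :
    PySem.Chars.join ['~'] ((pvSpl l).map (fun p => pvRep2 (pvRep1 p))) = pvAScan l := by
  induction l using pvAScan.induct with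
  | case1 => simp [pvSpl, pvRep1, pvRep2, pvAScan, PySem.Chars.join, List.intercalate]
  | case2 rest ih =>
    -- l = '~' :: '1' :: rest ↦ '\n'
    obtain ⟨h0, ps, hps⟩ := pvSpl_dest rest
    rw [pvSpl_tilde '1' rest (by decide), pvSpl_cons_ne '1' rest (by decide)]
    rw [hps] at ih ⊢
    simp only [List.headI, List.tail, List.map, pvJoin_cons] at ih ⊢
    rw [show pvRep1 ('~' :: '1' :: h0) = '\n' :: pvRep1 h0 from rfl]
    rw [pvRep2_cons_ne '\n' _ (by decide)]
    rw [show pvAScan ('~' :: '1' :: rest) = '\n' :: pvAScan rest from by simp [pvAScan]]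
    rw [← ih]
    simp
  | case3 rest h2' ih =>
    -- l = '~' :: '2' :: rest ↦ '|'
    obtain ⟨h0, ps, hps⟩ := pvSpl_dest rest
    rw [pvSpl_tilde '2' rest (by decide), pvSpl_cons_ne '2' rest (by decide)]
    rw [hps] at ih ⊢
    simp only [List.headI, List.tail, List.map, pvJoin_cons] at ih ⊢
    rw [pvRep1_tilde '2' h0 (by decide), pvRep1_cons_ne '2' h0 (by decide)]
    rw [show pvRep2 ('~' :: '2' :: pvRep1 h0) = '|' :: pvRep2 (pvRep1 h0) from rfl]
    rw [show pvAScan ('~' :: '2' :: rest) = '|' :: pvAScan rest from by simp [pvAScan]]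
    rw [← ih]
    simp
  | case4 rest h1 h2 ih =>
    -- l = '~' :: '~' :: rest ↦ '~'
    obtain ⟨h0, ps, hps⟩ := pvSpl_dest rest
    rw [show pvSpl ('~' :: '~' :: rest) = [] :: pvSpl rest from rfl]
    rw [hps] at ih ⊢
    simp only [List.map, pvJoin_cons] at ih ⊢
    rw [show pvRep2 (pvRep1 []) = [] from rfl]
    rw [show pvAScan ('~' :: '~' :: rest) = '~' :: pvAScan rest from by simp [pvAScan]]
    rw [← ih]
    simp
  | case5 next rest h1 h2 h3 ih =>
    -- l = '~' :: next :: rest, next not special ↦ literal '~'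
    obtain ⟨h0, ps, hps⟩ := pvSpl_dest rest
    rw [pvSpl_tilde next rest h3, pvSpl_cons_ne next rest h3]
    rw [pvSpl_cons_ne next rest h3, hps] at ih
    rw [hps]
    simp only [List.headI, List.tail, List.map, pvJoin_cons] at ih ⊢
    rw [pvRep1_tilde next h0 h1, pvRep1_cons_ne next h0 h3]
    rw [pvRep2_tilde next _ h2, pvRep2_cons_ne next _ h3]
    rw [show pvAScan ('~' :: next :: rest) = '~' :: pvAScan (next :: rest) from by
      simp [pvAScan, h1, h2, h3]]
    rw [← ih]
    rw [pvRep1_cons_ne next h0 h3, pvRep2_cons_ne next _ h3]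
    simp
  | case6 c rest hshape ih =>
    by_cases hc : c = '~'
    · -- then rest = [] and l = ['~']
      subst hc
      have hr : rest = [] := by
        cases rest with
        | nil => rfl
        | cons d t => exact (hshape d t rfl rfl).elim
      subst hr
      simp [pvSpl, pvRep1, pvRep2, pvAScan, PySem.Chars.join, List.intercalate]
    · obtain ⟨h0, ps, hps⟩ := pvSpl_dest rest
      rw [pvSpl_cons_ne c rest hc]
      rw [hps] at ih ⊢
      simp only [List.headI, List.tail, List.map, pvJoin_cons] at ih ⊢
      rw [pvDec_cons_ne c h0 hc]
      rw [pvAScan_cons_ne c rest hc]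
      rw [← ih]
      simp

lemma pvB_eq (l : List Char) :
    PySem.Chars.join "~".toList ((PySem.Chars.splitOn l "~~".toList).map pvDecodePart) = pvAScan l := by
  rw [show "~~".toList = ['~','~'] from rfl, show "~".toList = ['~'] from rfl]
  rw [pvSplitOn_eq]
  have hdec : pvDecodePart = fun p => pvRep2 (pvRep1 p) := by
    funext p
    rw [pvDecodePart, show "~1".toList = ['~','1'] from rfl, show "\n".toList = ['\n'] from rfl,
        show "~2".toList = ['~','2'] from rfl, show "|".toList = ['|'] from rfl,
        pvReplace1_eq, pvReplace2_eq]
  rw [hdec, pvMain]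

-- ===== VERDICT (by name: the statement is the Claim_ definition above) =====
theorem decode_altium_multiline_text_py_spec : Claim_equal_decode_altium_multiline_text_py := by
  intro value _
  unfold Spec_decode_altium_multiline_text_py decode_altium_multiline_text_py decode_altium_multiline_text_py_alt
  exact (congrArg String.ofList (pvB_eq _)).symm
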